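-- pv_equiv track=rewrite | github.com/code-codeworld/AvdentOfCode2023 | Part2.py | identify_snow_terms
-- ===== SOURCE A (Python) =====
-- def identify_snow_terms(line):
--     snow_terms = ["zero", "one", "two", "three", "four", "five", "six", "seven", "eight", "nine"]
--     identified_terms = []
--
--     for term in snow_terms:
--         # Find all occurrences of the term in the line
--         start_index = 0
--         while start_index < len(line):
--             if line.startswith(term, start_index):
--                 identified_terms.append((term, start_index))
--                 start_index += len(term)
--             else:
--                 start_index += 1
--
--     # Sort the identified terms based on the start index
--     identified_terms.sort(key=lambda x: x[1])
--
--     # Extract the sorted terms from the tuples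
--     sorted_terms = [term for term, _ in identified_terms]
--
--     return sorted_terms
-- ===== SOURCE B (Python) =====
-- def identify_snow_terms(line):
--     snow_terms = ["zero", "one", "two", "three", "four", "five", "six", "seven", "eight", "nine"]
--     result = []
--     for i in range(len(line)):
--         for term in snow_terms:
--             if line.startswith(term, i):
--                 result.append(term)
--                 break
--     return result
-- ===== Notes on version B (the rewrite author's own statement) =====
-- stated objective: simpler
-- what changed: Replaces A's ten independent per-term scans (with skip-by-length), tuple accumulation and final stable sort by one left-to-right pass over the positions that appends the unique digit word starting at each index, so the sort and the tuple-extraction step disappear.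
import Mathlib
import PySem

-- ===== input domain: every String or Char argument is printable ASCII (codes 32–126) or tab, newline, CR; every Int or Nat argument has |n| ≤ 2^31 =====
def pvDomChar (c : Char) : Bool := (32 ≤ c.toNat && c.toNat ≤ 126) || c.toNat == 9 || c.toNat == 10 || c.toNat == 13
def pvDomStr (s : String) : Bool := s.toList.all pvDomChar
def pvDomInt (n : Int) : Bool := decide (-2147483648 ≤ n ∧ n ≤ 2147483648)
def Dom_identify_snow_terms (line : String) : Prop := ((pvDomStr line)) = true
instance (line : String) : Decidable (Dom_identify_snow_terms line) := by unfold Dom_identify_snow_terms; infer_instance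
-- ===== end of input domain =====

-- B replaces A's ten per-term scans plus a stable sort by one left-to-right pass that emits the
-- (unique) digit word starting at each position, so the sort and the tuple step disappear (objective: simpler).

-- shared primitive: Python's `line.startswith(t, i)` for a nonnegative start index i (exact on that domain)
def pyStartswithFrom (line t : String) (i : Nat) : Bool :=
  PySem.Chars.startswith (line.toList.drop i) t.toList

-- the literal list both Pythons write out
def snowTerms : List String :=
  ["zero", "one", "two", "three", "four", "five", "six", "seven", "eight", "nine"]

-- ===== PORT A =====
-- A's inner while-loop for one term: scan from start_index i, append (term, index), skip by len on a hit.
-- The fuel argument only bounds the recursion; it starts at len(line), which each nonempty term's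
-- loop (the index grows by at least 1 per step) never exhausts before start_index reaches len(line).
def scanTermA (line t : String) : Nat → List (String × Int) → Nat → List (String × Int)
  | 0, acc, _ => acc
  | fuel + 1, acc, i =>
    if i < line.toList.length then
      if pyStartswithFrom line t i then
        scanTermA line t fuel (acc ++ [(t, (i : Int))]) (i + t.toList.length)
      else scanTermA line t fuel acc (i + 1)
    else acc

def identify_snow_terms (line : String) : List String :=
  let identified := snowTerms.foldl
    (fun acc term => scanTermA line term line.toList.length acc 0) []
  (PySem.List.sorted identified (fun x => x.2) false).map (fun x => x.1)

-- ===== PORT B =====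
-- B's inner `for term in snow_terms: if startswith: append; break` = first matching term, if any
def firstTermAt (line : String) (i : Nat) : Option String :=
  snowTerms.find? (fun term => pyStartswithFrom line term i)

def identify_snow_terms_alt (line : String) : List String :=
  (List.range line.toList.length).foldl
    (fun acc i =>
      match firstTermAt line i with
      | some term => acc ++ [term]
      | none => acc) []

-- ===== PRECONDITION & SPEC =====
def Spec_identify_snow_terms (line : String) (out : List String) : Prop := out = identify_snow_terms_alt line
instance (line : String) (out : List String) : Decidable (Spec_identify_snow_terms line out) := by unfold Spec_identify_snow_terms; infer_instance

-- ===== CLAIM (what is proved, stated in full; the proofs are below) =====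
def Claim_equal_identify_snow_terms : Prop := ∀ (line : String), Dom_identify_snow_terms line → Spec_identify_snow_terms line (identify_snow_terms line)

-- ===== LEMMAS AND PROOFS =====

-- the ten words, decided facts: distinct, nonempty, border-free, none a prefix of another
theorem snowTerms_nodup : snowTerms.Nodup := by decide

theorem snowTerms_nonempty : ∀ t ∈ snowTerms, t.toList.length ≠ 0 := by decide

theorem snowTerms_noborder :
    ∀ t ∈ snowTerms, ∀ d < t.toList.length, 0 < d → ¬ (t.toList.drop d <+: t.toList) := by decide

theorem snowTerms_noprefix :
    ∀ t₁ ∈ snowTerms, ∀ t₂ ∈ snowTerms, t₁.toList <+: t₂.toList → t₁ = t₂ := by decide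

theorem pyStartswithFrom_iff (line t : String) (i : Nat) :
    pyStartswithFrom line t i = true ↔ t.toList <+: line.toList.drop i :=
  PySem.Chars.startswith_iff _ _

-- a border-free word matching at i cannot match again before i + its length
theorem no_match_between {s t : List Char}
    (hb : ∀ d < t.length, 0 < d → ¬ (t.drop d <+: t))
    {i j : Nat} (hm : t <+: s.drop i) (hij : i < j) (hj : j < i + t.length) :
    ¬ t <+: s.drop j := by
  intro h
  obtain ⟨u, hu⟩ := hm
  have hsj : s.drop j = t.drop (j - i) ++ u := by
    have h1 : s.drop j = (s.drop i).drop (j - i) := by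
      rw [List.drop_drop]; congr 1; omega
    rw [h1, ← hu, List.drop_append]
    have : j - i - t.length = 0 := by omega
    rw [this, List.drop_zero]
  have hpre : t.drop (j - i) <+: t := by
    apply List.prefix_of_prefix_length_le (l₃ := t.drop (j - i) ++ u)
      (List.prefix_append _ _) (hsj ▸ h)
    simp
  exact hb (j - i) (by omega) (by omega) hpre

-- dropping an initial segment on which F is none does not change a filterMap over a range
theorem filterMap_range'_shift {γ} (F : Nat → Option γ) :
    ∀ (k a b : Nat), (∀ j, a ≤ j → j < a + k → F j = none) →
      (List.range' a b).filterMap F = (List.range' (a + k) (b - k)).filterMap F := by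
  intro k
  induction k with
  | zero => intro a b _; simp
  | succ k ih =>
    intro a b hF
    cases b with
    | zero => simp
    | succ b =>
      rw [List.range'_succ, List.filterMap_cons, hF a (le_refl a) (by omega),
        ih (a + 1) b (fun j h1 h2 => hF j (by omega) (by omega))]
      have e1 : a + 1 + k = a + (k + 1) := by omega
      have e2 : b - k = b + 1 - (k + 1) := by omega
      rw [e1, e2]

-- what A's per-term scan computes: all match positions of t, in increasing order
theorem scanTermA_spec (line t : String) (hne : t.toList.length ≠ 0)
    (hb : ∀ d < t.toList.length, 0 < d → ¬ (t.toList.drop d <+: t.toList)) :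
    ∀ (fuel : Nat) (acc : List (String × Int)) (i : Nat), line.toList.length - i ≤ fuel →
      scanTermA line t fuel acc i =
        acc ++ (List.range' i (line.toList.length - i)).filterMap
          (fun j => if pyStartswithFrom line t j then some (t, (j : Int)) else none) := by
  intro fuel
  induction fuel with
  | zero =>
    intro acc i hm
    have h0 : line.toList.length - i = 0 := by omega
    rw [scanTermA, h0]
    simp
  | succ m ih =>
    intro acc i hm
    by_cases hi : i < line.toList.length
    · have hrange : line.toList.length - i = (line.toList.length - i - 1) + 1 := by omega
      rw [scanTermA, if_pos hi]
      by_cases hp : pyStartswithFrom line t i = true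
      · rw [if_pos hp, hrange, List.range'_succ, List.filterMap_cons, if_pos hp]
        have hnomid : ∀ j, i + 1 ≤ j → j < i + 1 + (t.toList.length - 1) →
            (if pyStartswithFrom line t j then some (t, (j : Int)) else none)
              = (none : Option (String × Int)) := by
          intro j h1 h2
          have hnot : ¬ t.toList <+: line.toList.drop j :=
            no_match_between hb ((pyStartswithFrom_iff line t i).1 hp) (by omega) (by omega)
          have hfalse : pyStartswithFrom line t j = false := by
            cases hq : pyStartswithFrom line t j
            · rfl
            · exact absurd ((pyStartswithFrom_iff line t j).1 hq) hnot
          rw [hfalse]; rfl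
        rw [filterMap_range'_shift _ (t.toList.length - 1) (i + 1) (line.toList.length - i - 1) hnomid]
        have e1 : i + 1 + (t.toList.length - 1) = i + t.toList.length := by omega
        have e2 : line.toList.length - i - 1 - (t.toList.length - 1)
            = line.toList.length - (i + t.toList.length) := by omega
        rw [e1, e2, ih (acc ++ [(t, (i : Int))]) (i + t.toList.length) (by omega)]
        simp
      · rw [if_neg hp, hrange, List.range'_succ, List.filterMap_cons,
          if_neg hp, ih acc (i + 1) (by omega)]
        have e : line.toList.length - i - 1 = line.toList.length - (i + 1) := by omega
        rw [e]
    · rw [scanTermA, if_neg hi]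
      have h0 : line.toList.length - i = 0 := by omega
      rw [h0]; simp

-- at most one of the ten words starts at a given position
theorem unique_match (line : String) (j : Nat) :
    ∀ t₁ ∈ snowTerms, ∀ t₂ ∈ snowTerms,
      pyStartswithFrom line t₁ j = true → pyStartswithFrom line t₂ j = true → t₁ = t₂ := by
  intro t₁ h₁ t₂ h₂ m₁ m₂
  have p₁ := (pyStartswithFrom_iff line t₁ j).1 m₁
  have p₂ := (pyStartswithFrom_iff line t₂ j).1 m₂
  rcases le_total t₁.toList.length t₂.toList.length with hle | hle
  · exact snowTerms_noprefix t₁ h₁ t₂ h₂ (List.prefix_of_prefix_length_le p₁ p₂ hle)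
  · exact (snowTerms_noprefix t₂ h₂ t₁ h₁ (List.prefix_of_prefix_length_le p₂ p₁ hle)).symm

-- collecting all matches of a predicate that holds at most once = taking the first match
theorem filterMap_ite_eq_find? {α γ} (l : List α) (p : α → Bool) (f : α → γ)
    (hnd : l.Nodup) (huniq : ∀ a ∈ l, ∀ b ∈ l, p a = true → p b = true → a = b) :
    l.filterMap (fun a => if p a then some (f a) else none) = ((l.find? p).map f).toList := by
  induction l with
  | nil => simp
  | cons a l ih =>
    rw [List.filterMap_cons]
    cases hpa : p a
    · rw [if_neg (by simp), List.find?_cons_of_neg (by simp [hpa])]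
      exact ih (List.nodup_cons.mp hnd).2
        (fun x hx y hy => huniq x (List.mem_cons_of_mem a hx) y (List.mem_cons_of_mem a hy))
    · rw [if_pos rfl, List.find?_cons_of_pos hpa]
      have htail : ∀ b ∈ l, p b = false := by
        intro b hb
        cases hq : p b
        · rfl
        · have hba : b = a := huniq b (List.mem_cons_of_mem a hb) a List.mem_cons_self hq hpa
          exact absurd (hba ▸ hb) (List.nodup_cons.mp hnd).1
      have hnil : l.filterMap (fun a => if p a then some (f a) else none) = [] := by
        rw [List.filterMap_eq_nil_iff]
        intro b hb; rw [htail b hb]; rfl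
      rw [hnil]; rfl

theorem flatMap_append_perm {β γ} (m : List β) (p q : β → List γ) :
    (m.flatMap fun b => p b ++ q b).Perm (m.flatMap p ++ m.flatMap q) := by
  induction m with
  | nil => simp
  | cons b m ih =>
    simp only [List.flatMap_cons, List.append_assoc]
    refine List.Perm.append_left (p b) ?_
    exact (List.Perm.append_left (q b) ih).trans (List.perm_append_comm_assoc _ _ _)

-- exchanging the two iteration orders is a permutation
theorem flatMap_filterMap_perm {α β γ} (l : List α) (m : List β) (g : α → β → Option γ) :
    (l.flatMap fun a => m.filterMap (g a)).Perm (m.flatMap fun b => l.filterMap (fun a => g a b)) := by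
  induction l with
  | nil => simp
  | cons a l ih =>
    simp only [List.flatMap_cons]
    have h1 : (m.flatMap fun b => (a :: l).filterMap (fun a => g a b))
        = m.flatMap fun b => ((g a b).toList ++ l.filterMap (fun a => g a b)) := by
      congr 1; funext b
      cases h : g a b <;> simp [h]
    rw [h1, List.filterMap_eq_flatMap_toList]
    exact (ih.append_left _).trans (flatMap_append_perm m _ _).symm

-- the single-pass match list, with positions
def posMatches (line : String) : List (String × Int) :=
  (List.range line.toList.length).filterMap
    (fun j => (firstTermAt line j).map (fun t => (t, (j : Int))))

theorem bigL_perm (line : String) :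
    (posMatches line).Perm
      (snowTerms.flatMap fun t =>
        (List.range line.toList.length).filterMap
          (fun j => if pyStartswithFrom line t j then some (t, (j : Int)) else none)) := by
  have hswap := flatMap_filterMap_perm snowTerms (List.range line.toList.length)
    (fun t j => if pyStartswithFrom line t j then some (t, (j : Int)) else none)
  have hinner : ∀ j, snowTerms.filterMap
      (fun t => if pyStartswithFrom line t j then some (t, (j : Int)) else none)
      = ((firstTermAt line j).map (fun t => (t, (j : Int)))).toList := fun j =>
    filterMap_ite_eq_find? snowTerms (fun t => pyStartswithFrom line t j)
      (fun t => (t, (j : Int))) snowTerms_nodup (unique_match line j)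
  have heq : (List.range line.toList.length).flatMap
      (fun j => snowTerms.filterMap
        (fun t => if pyStartswithFrom line t j then some (t, (j : Int)) else none))
      = posMatches line := by
    rw [posMatches, List.filterMap_eq_flatMap_toList]
    congr 1; funext j; exact hinner j
  exact heq ▸ hswap.symm

theorem posMatches_pairwise (line : String) :
    (posMatches line).Pairwise (fun a b => a.2 < b.2) := by
  rw [posMatches]
  apply List.pairwise_filterMap.mpr
  refine List.pairwise_lt_range.imp ?_
  intro j j' hjj' b hb b' hb'
  rcases Option.map_eq_some_iff.mp hb with ⟨t, _, rfl⟩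
  rcases Option.map_eq_some_iff.mp hb' with ⟨t', _, rfl⟩
  show (j : Int) < (j' : Int)
  exact_mod_cast hjj'

theorem A_eq_map_posMatches (line : String) :
    identify_snow_terms line = (posMatches line).map (fun x => x.1) := by
  show (PySem.List.sorted
      (snowTerms.foldl (fun acc term => scanTermA line term line.toList.length acc 0) [])
      (fun x => x.2) false).map (fun x => x.1) = _
  have hfold : snowTerms.foldl (fun acc term => scanTermA line term line.toList.length acc 0) []
      = snowTerms.flatMap (fun t =>
          (List.range line.toList.length).filterMap
            (fun j => if pyStartswithFrom line t j then some (t, (j : Int)) else none)) := by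
    rw [PySem.List.foldl_congr_mem snowTerms _
      (fun acc t => acc ++ (List.range line.toList.length).filterMap
        (fun j => if pyStartswithFrom line t j then some (t, (j : Int)) else none)) []
      (by
        intro acc t ht
        have := scanTermA_spec line t (snowTerms_nonempty t ht) (snowTerms_noborder t ht)
          line.toList.length acc 0 (by omega)
        rw [this, Nat.sub_zero, List.range_eq_range'])]
    rw [PySem.List.foldl_append_eq_flatMap]
    simp
  rw [hfold,
    PySem.List.sorted_eq_of_perm_of_pairwise_lt _ (posMatches line) (fun x => x.2)
      (bigL_perm line) (posMatches_pairwise line)]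

theorem foldl_matchOpt_append (line : String) :
    ∀ (l : List Nat) (acc : List String),
      l.foldl (fun acc i =>
        match firstTermAt line i with
        | some term => acc ++ [term]
        | none => acc) acc = acc ++ l.filterMap (firstTermAt line) := by
  intro l
  induction l with
  | nil => intro acc; simp
  | cons i l ih =>
    intro acc
    rw [List.foldl_cons, List.filterMap_cons]
    cases h : firstTermAt line i
    · rw [ih]
    · rw [ih]; simp

theorem B_eq_filterMap (line : String) :
    identify_snow_terms_alt line = (List.range line.toList.length).filterMap (firstTermAt line) := by
  show (List.range line.toList.length).foldl _ [] = _
  rw [foldl_matchOpt_append line (List.range line.toList.length) []]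
  rfl

-- ===== VERDICT (by name: the statement is the Claim_ definition above) =====
theorem identify_snow_terms_spec : Claim_equal_identify_snow_terms := by
  intro line _
  show identify_snow_terms line = identify_snow_terms_alt line
  rw [A_eq_map_posMatches, B_eq_filterMap]
  unfold posMatches
  rw [List.map_filterMap]
  simp [Option.map_map, Function.comp_def]
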